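-- pv_equiv track=rewrite | github.com/AatifPathan/CN-LAB | Character stuffing.py | character_stuffing
-- ===== SOURCE A (Python) =====
-- FLAG = "F"  # Special flag character
--
-- ESC = "E"   # Escape characte
--
-- def character_stuffing(data):
--     stuffed_data = ""
--     for char in data:
--         if char in (FLAG, ESC):
--             stuffed_data += ESC + char
--         else:
--             stuffed_data += char
--     return FLAG + stuffed_data + FLAG
-- ===== SOURCE B (Python) =====
-- FLAG = "F"  # Special flag character
--
-- ESC = "E"   # Escape characte
--
-- def character_stuffing(data):
--     # Two ordered whole-string replacements: escape the escapes first,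
--     # then escape the flags, then frame with flags.
--     body = data.replace(ESC, ESC + ESC).replace(FLAG, ESC + FLAG)
--     return FLAG + body + FLAG
-- ===== Notes on version B (the rewrite author's own statement) =====
-- stated objective: idiomatic
-- what changed: Replaced the per-character accumulation loop by two ordered whole-string str.replace passes (escape ESC first, then FLAG) plus framing.
import Mathlib
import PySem

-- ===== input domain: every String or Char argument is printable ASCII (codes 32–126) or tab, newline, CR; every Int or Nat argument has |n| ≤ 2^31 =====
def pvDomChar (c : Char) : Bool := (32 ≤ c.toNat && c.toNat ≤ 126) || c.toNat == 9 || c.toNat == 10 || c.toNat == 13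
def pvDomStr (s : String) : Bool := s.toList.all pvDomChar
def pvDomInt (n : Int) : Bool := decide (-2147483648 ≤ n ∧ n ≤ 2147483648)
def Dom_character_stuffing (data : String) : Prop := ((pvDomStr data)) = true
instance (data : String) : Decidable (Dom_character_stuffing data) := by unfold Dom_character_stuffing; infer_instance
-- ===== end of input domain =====

-- B replaces A's per-character accumulation loop by two ordered whole-string
-- replace passes (ESC first, then FLAG) plus framing; objective: idiomatic.

-- ===== PORT A =====
-- per-character loop: stuffed_data += ESC + char / char, then FLAG + … + FLAG
def character_stuffing (data : String) : String :=
  let stuffed_data : String :=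
    data.toList.foldl
      (fun acc c =>
        if c == 'F' || c == 'E' then acc ++ ("E" ++ String.ofList [c])
        else acc ++ String.ofList [c]) ""
  "F" ++ stuffed_data ++ "F"

-- ===== PORT B =====
-- two ordered str.replace passes, then framing
def character_stuffing_alt (data : String) : String :=
  let body := PySem.Str.replace (PySem.Str.replace data "E" "EE") "F" "EF"
  "F" ++ body ++ "F"

-- ===== PRECONDITION & SPEC =====
def Spec_character_stuffing (data : String) (out : String) : Prop := out = character_stuffing_alt data
instance (data : String) (out : String) : Decidable (Spec_character_stuffing data out) := by unfold Spec_character_stuffing; infer_instance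

-- ===== CLAIM (what is proved, stated in full; the proofs are below) =====
def Claim_equal_character_stuffing : Prop := ∀ (data : String), Dom_character_stuffing data → Spec_character_stuffing data (character_stuffing data)

-- ===== LEMMAS AND PROOFS =====

-- character-wise substitution: what one replace pass with a single-char pattern does
def pvSubst (x : Char) (new : List Char) (l : List Char) : List Char :=
  l.flatMap (fun c => if c == x then new else [c])

theorem pvSubst_nil (x : Char) (new : List Char) : pvSubst x new [] = [] := rfl

theorem pvSubst_cons (x : Char) (new : List Char) (c : Char) (t : List Char) :
    pvSubst x new (c :: t) = (if c == x then new else [c]) ++ pvSubst x new t := by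
  simp [pvSubst]

-- replace.go with a single-char pattern and enough fuel is pvSubst (plus the reversed accumulator)
theorem pv_go_single (x : Char) (new : List Char) :
    ∀ (fuel : Nat) (l acc : List Char), l.length ≤ fuel →
      PySem.Chars.replace.go [x] new fuel l acc = acc.reverse ++ pvSubst x new l := by
  intro fuel
  induction fuel with
  | zero =>
    intro l acc h
    have hl : l = [] := List.length_eq_zero_iff.mp (Nat.le_zero.mp h)
    subst hl
    simp [PySem.Chars.replace.go, pvSubst]
  | succ n ih =>
    intro l acc h
    cases l with
    | nil => simp [PySem.Chars.replace.go, pvSubst]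
    | cons c t =>
      have hle : t.length ≤ n := by simpa using h
      by_cases hc : c = x
      · subst hc
        have hpre : List.isPrefixOf [c] (c :: t) = true := by
          simp [List.isPrefixOf]
        rw [PySem.Chars.replace.go, if_pos hpre]
        have hdrop : List.drop ([c].length) (c :: t) = t := rfl
        rw [hdrop, ih t _ hle, pvSubst_cons]
        simp
      · have hpre : List.isPrefixOf [x] (c :: t) = false := by
          simp [List.isPrefixOf, BEq.beq]
          intro h'; exact absurd h'.symm hc
        rw [PySem.Chars.replace.go, if_neg (by simp [hpre])]
        rw [ih t _ hle, pvSubst_cons]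
        simp [hc]

theorem pv_replace_single (x : Char) (new : List Char) (l : List Char) :
    PySem.Chars.replace l [x] new = pvSubst x new l := by
  rw [PySem.Chars.replace]
  simp only [List.isEmpty_cons, Bool.false_eq_true, if_false]
  exact pv_go_single x new l.length l [] le_rfl

theorem pvSubst_append (x : Char) (new a b : List Char) :
    pvSubst x new (a ++ b) = pvSubst x new a ++ pvSubst x new b := by
  simp [pvSubst]

-- the two ordered passes agree, character by character, with A's one-pass escaping
theorem pv_two_passes (l : List Char) :
    pvSubst 'F' ['E', 'F'] (pvSubst 'E' ['E', 'E'] l)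
      = l.flatMap (fun c => if c == 'F' || c == 'E' then ['E', c] else [c]) := by
  induction l with
  | nil => rfl
  | cons c t ih =>
    rw [pvSubst_cons 'E', pvSubst_append, ih, List.flatMap_cons]
    congr 1
    by_cases hE : c = 'E'
    · subst hE; rfl
    · by_cases hF : c = 'F'
      · subst hF; rfl
      · rw [if_neg (by simpa using hE)]
        rw [pvSubst_cons, pvSubst_nil, if_neg (by simpa using hF)]
        rw [if_neg (by simp [hE, hF])]
        rfl

-- A's foldl over strings, read on toList, is the flatMap above
theorem pv_foldl_toList (l : List Char) (acc : String) :
    (l.foldl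
      (fun acc c =>
        if c == 'F' || c == 'E' then acc ++ ("E" ++ String.ofList [c])
        else acc ++ String.ofList [c]) acc).toList
      = acc.toList ++ l.flatMap (fun c => if c == 'F' || c == 'E' then ['E', c] else [c]) := by
  induction l generalizing acc with
  | nil => simp
  | cons c t ih =>
    rw [List.foldl_cons, ih, List.flatMap_cons]
    by_cases h : (c == 'F' || c == 'E') = true
    · rw [if_pos h, if_pos h]
      simp [String.toList_append]
    · rw [if_neg h, if_neg h]
      simp [String.toList_append]

-- ===== VERDICT (by name: the statement is the Claim_ definition above) =====
theorem character_stuffing_spec : Claim_equal_character_stuffing := by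
  intro data _
  unfold Spec_character_stuffing character_stuffing character_stuffing_alt
  apply String.ext  -- equality via toList
  have hB : (PySem.Str.replace (PySem.Str.replace data "E" "EE") "F" "EF").toList
      = pvSubst 'F' ['E', 'F'] (pvSubst 'E' ['E', 'E'] data.toList) := by
    simp only [PySem.Str.replace, String.toList_ofList]
    rw [show ("E" : String).toList = ['E'] from rfl,
        show ("EE" : String).toList = ['E', 'E'] from rfl,
        show ("F" : String).toList = ['F'] from rfl,
        show ("EF" : String).toList = ['E', 'F'] from rfl,
        pv_replace_single, pv_replace_single]
  simp only [String.toList_append, pv_foldl_toList, hB, pv_two_passes]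
  rfl
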